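-- pv_equiv track=rewrite | github.com/yudistiraashadi/plagiarism-checker | src/plagiarism_checker/checker/matcher.py | group_matches_by_document
-- ===== SOURCE A (Python) =====
-- def group_matches_by_document(
--     db_matches: list[tuple[int, int, int, int]],
--     submitted_fps: list[tuple[int, int, int]],
-- ) -> dict[int, list[tuple]]:
--     """Group DB matches by document_id, paired with submitted fingerprint info.
--
--     db_matches: (document_id, hash_value, source_pos_start, source_pos_end)
--     submitted_fps: (pos_start, pos_end, hash_value)
--
--     Returns: {document_id: [(sub_pos_start, sub_pos_end, src_pos_start, src_pos_end, hash_value), ...]}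
--     """
--     # Use a list to handle duplicate hashes at different positions
--     sub_by_hash: dict[int, list[tuple[int, int]]] = {}
--     for pos_start, pos_end, hash_val in submitted_fps:
--         sub_by_hash.setdefault(hash_val, []).append((pos_start, pos_end))
--
--     grouped: dict[int, list[tuple]] = {}
--     for doc_id, hash_val, src_start, src_end in db_matches:
--         if hash_val not in sub_by_hash:
--             continue
--         for sub_start, sub_end in sub_by_hash[hash_val]:
--             grouped.setdefault(doc_id, []).append(
--                 (sub_start, sub_end, src_start, src_end, hash_val)
--             )
--
--     return grouped
-- ===== SOURCE B (Python) =====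
-- def group_matches_by_document(
--     db_matches: list[tuple[int, int, int, int]],
--     submitted_fps: list[tuple[int, int, int]],
-- ) -> dict[int, list[tuple]]:
--     """Group DB matches by document_id, paired with submitted fingerprint info.
--
--     Staged group-by: first flatten everything into a single list of
--     (doc_id, record) pairs with a nested comprehension, then build the result
--     dict in one comprehension over the distinct doc_ids in first-occurrence
--     order, collecting each key's records by filtering the flat list.
--     """
--     pairs = [
--         (doc_id, (sub_start, sub_end, src_start, src_end, hash_val))
--         for doc_id, hash_val, src_start, src_end in db_matches
--         for sub_start, sub_end, h in submitted_fps
--         if h == hash_val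
--     ]
--     return {
--         doc_id: [rec for k, rec in pairs if k == doc_id]
--         for doc_id in dict.fromkeys(k for k, _ in pairs)
--     }
-- ===== Notes on version B (the rewrite author's own statement) =====
-- stated objective: simpler
-- what changed: Replaces A's two incrementally built dicts (hash index + grouped accumulator) with a staged group-by: a nested comprehension flattens everything into one list of (doc_id, record) pairs, and the result dict is then a single comprehension over the distinct doc_ids in first-occurrence order, filtering the flat list per key.
import Mathlib
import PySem

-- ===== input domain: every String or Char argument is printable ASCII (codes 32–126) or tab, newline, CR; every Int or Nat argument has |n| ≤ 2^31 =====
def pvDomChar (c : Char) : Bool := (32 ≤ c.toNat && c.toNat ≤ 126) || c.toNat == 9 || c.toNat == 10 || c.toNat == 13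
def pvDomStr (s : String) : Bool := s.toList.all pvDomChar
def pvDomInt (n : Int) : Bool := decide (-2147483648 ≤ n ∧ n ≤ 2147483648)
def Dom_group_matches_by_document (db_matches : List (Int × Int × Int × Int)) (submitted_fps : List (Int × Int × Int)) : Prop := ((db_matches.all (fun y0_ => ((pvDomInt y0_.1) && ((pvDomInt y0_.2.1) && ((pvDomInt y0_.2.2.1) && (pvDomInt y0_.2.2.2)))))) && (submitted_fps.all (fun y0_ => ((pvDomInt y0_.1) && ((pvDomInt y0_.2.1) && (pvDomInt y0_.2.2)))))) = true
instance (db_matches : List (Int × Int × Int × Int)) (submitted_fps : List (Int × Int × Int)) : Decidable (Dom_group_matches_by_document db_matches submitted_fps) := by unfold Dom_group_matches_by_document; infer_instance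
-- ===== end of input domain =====

-- B replaces A's two incrementally built dicts by a staged group-by over a flat pair list (simpler); same return value.

-- ===== PORT A =====
-- first loop of A: sub_by_hash.setdefault(hash_val, []).append((pos_start, pos_end))
def pvSubByHash (submitted_fps : List (Int × Int × Int)) : PySem.Dict Int (List (Int × Int)) :=
  submitted_fps.foldl (fun d p => d.modify p.2.2 [] (· ++ [(p.1, p.2.1)])) PySem.Dict.empty

def group_matches_by_document (db_matches : List (Int × Int × Int × Int)) (submitted_fps : List (Int × Int × Int)) : List (Int × List (Int × Int × Int × Int × Int)) :=
  let sub_by_hash := pvSubByHash submitted_fps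
  let grouped : PySem.Dict Int (List (Int × Int × Int × Int × Int)) :=
    db_matches.foldl (fun g q =>
      if sub_by_hash.contains q.2.1 then
        (sub_by_hash.getD q.2.1 []).foldl (fun g2 r =>
          g2.modify q.1 [] (· ++ [(r.1, r.2, q.2.2.1, q.2.2.2, q.2.1)])) g
      else g) PySem.Dict.empty
  grouped.items

-- ===== PORT B =====
def group_matches_by_document_alt (db_matches : List (Int × Int × Int × Int)) (submitted_fps : List (Int × Int × Int)) : List (Int × List (Int × Int × Int × Int × Int)) :=
  let pairs : List (Int × (Int × Int × Int × Int × Int)) :=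
    db_matches.flatMap (fun q =>
      (submitted_fps.filter (fun r => r.2.2 == q.2.1)).map
        (fun r => (q.1, (r.1, r.2.1, q.2.2.1, q.2.2.2, q.2.1))))
  (PySem.List.dedup (pairs.map (·.1))).map
    (fun k => (k, (pairs.filter (fun p => p.1 == k)).map (·.2)))

-- ===== PRECONDITION & SPEC =====
def Spec_group_matches_by_document (db_matches : List (Int × Int × Int × Int)) (submitted_fps : List (Int × Int × Int)) (out : List (Int × List (Int × Int × Int × Int × Int))) : Prop := out = group_matches_by_document_alt db_matches submitted_fps
instance (db_matches : List (Int × Int × Int × Int)) (submitted_fps : List (Int × Int × Int)) (out : List (Int × List (Int × Int × Int × Int × Int))) : Decidable (Spec_group_matches_by_document db_matches submitted_fps out) := by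
  unfold Spec_group_matches_by_document
  letI : DecidableEq (Int × List (Int × Int × Int × Int × Int)) := instDecidableEqProd
  infer_instance

-- ===== CLAIM (what is proved, stated in full; the proofs are below) =====
def Claim_equal_group_matches_by_document : Prop := ∀ (db_matches : List (Int × Int × Int × Int)) (submitted_fps : List (Int × Int × Int)), Dom_group_matches_by_document db_matches submitted_fps → Spec_group_matches_by_document db_matches submitted_fps (group_matches_by_document db_matches submitted_fps)

-- ===== LEMMAS AND PROOFS =====

-- the flat pair list B builds, named for the proofs
def pvPairs (db_matches : List (Int × Int × Int × Int)) (submitted_fps : List (Int × Int × Int)) : List (Int × (Int × Int × Int × Int × Int)) :=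
  db_matches.flatMap (fun q =>
    (submitted_fps.filter (fun r => r.2.2 == q.2.1)).map
      (fun r => (q.1, (r.1, r.2.1, q.2.2.1, q.2.2.2, q.2.1))))

-- A's hash index: the bucket for hash c is the filtered-in-order projection of submitted_fps.
theorem pvSubByHash_getD (sub : List (Int × Int × Int)) (c : Int) :
    (pvSubByHash sub).getD c []
      = (sub.filter (fun r => r.2.2 == c)).map (fun r => (r.1, r.2.1)) := by
  unfold pvSubByHash
  rw [← List.foldl_map (f := fun r : Int × Int × Int => (r.2.2, (r.1, r.2.1)))
      (g := fun d p => PySem.Dict.modify d p.1 [] (· ++ [p.2]))]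
  rw [PySem.Dict.getD_foldl_modify_append]
  simp [List.filter_map, Function.comp_def]

-- if the index lacks hash c, no submitted fingerprint has hash c
theorem pvSubByHash_not_contains (sub : List (Int × Int × Int)) (c : Int)
    (hc : (pvSubByHash sub).contains c = false) :
    sub.filter (fun r => r.2.2 == c) = [] := by
  have h1 := pvSubByHash_getD sub c
  have h2 : (pvSubByHash sub).getD c [] = [] := PySem.Dict.getD_of_not_contains _ _ hc
  rw [h2] at h1
  exact List.map_eq_nil_iff.mp h1.symm

-- A's per-match body equals a modify-fold over that match's chunk of the flat pair list
theorem pvBodyChunk (sub : List (Int × Int × Int))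
    (g : PySem.Dict Int (List (Int × Int × Int × Int × Int))) (q : Int × Int × Int × Int) :
    (if (pvSubByHash sub).contains q.2.1 then
        ((pvSubByHash sub).getD q.2.1 []).foldl (fun g2 r =>
          g2.modify q.1 [] (· ++ [(r.1, r.2, q.2.2.1, q.2.2.2, q.2.1)])) g
      else g)
      = ((sub.filter (fun r => r.2.2 == q.2.1)).map
          (fun r => (q.1, (r.1, r.2.1, q.2.2.1, q.2.2.2, q.2.1)))).foldl
          (fun g2 p => g2.modify p.1 [] (· ++ [p.2])) g := by
  rw [List.foldl_map]
  by_cases hc : (pvSubByHash sub).contains q.2.1 = true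
  · rw [if_pos hc, pvSubByHash_getD, List.foldl_map]
  · simp only [Bool.not_eq_true] at hc
    rw [if_neg (by simp [hc]), pvSubByHash_not_contains sub q.2.1 hc]
    rfl

-- folding chunk-by-chunk over db_matches is folding over the flat pair list
theorem pvFoldFlat (db : List (Int × Int × Int × Int)) (sub : List (Int × Int × Int))
    (g : PySem.Dict Int (List (Int × Int × Int × Int × Int))) :
    db.foldl (fun g q =>
        ((sub.filter (fun r => r.2.2 == q.2.1)).map
          (fun r => (q.1, (r.1, r.2.1, q.2.2.1, q.2.2.2, q.2.1)))).foldl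
          (fun g2 p => g2.modify p.1 [] (· ++ [p.2])) g) g
      = (pvPairs db sub).foldl (fun g2 p => g2.modify p.1 [] (· ++ [p.2])) g := by
  induction db generalizing g with
  | nil => rfl
  | cons q t ih =>
    simp only [pvPairs, List.flatMap_cons, List.foldl_append, List.foldl_cons]
    exact ih _

-- ===== VERDICT (by name: the statement is the Claim_ definition above) =====
theorem group_matches_by_document_spec : Claim_equal_group_matches_by_document := by
  intro db sub _
  unfold Spec_group_matches_by_document
  show (db.foldl (fun g q =>
      if (pvSubByHash sub).contains q.2.1 then
        ((pvSubByHash sub).getD q.2.1 []).foldl (fun g2 r =>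
          g2.modify q.1 [] (· ++ [(r.1, r.2, q.2.2.1, q.2.2.2, q.2.1)])) g
      else g) PySem.Dict.empty).items
    = (PySem.List.dedup ((pvPairs db sub).map (·.1))).map
        (fun k => (k, ((pvPairs db sub).filter (fun p => p.1 == k)).map (·.2)))
  have hA : (db.foldl (fun g q =>
      if (pvSubByHash sub).contains q.2.1 then
        ((pvSubByHash sub).getD q.2.1 []).foldl (fun g2 r =>
          g2.modify q.1 [] (· ++ [(r.1, r.2, q.2.2.1, q.2.2.2, q.2.1)])) g
      else g) PySem.Dict.empty)
      = (pvPairs db sub).foldl (fun g2 p => g2.modify p.1 [] (· ++ [p.2]))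
          PySem.Dict.empty := by
    rw [← pvFoldFlat]
    exact PySem.List.foldl_congr_mem _ _ _ _ (fun g q _ => pvBodyChunk sub g q)
  rw [hA]
  have hnd : ((pvPairs db sub).foldl (fun g2 p => g2.modify p.1 [] (· ++ [p.2]))
      PySem.Dict.empty).keys.Nodup := by
    exact PySem.Dict.nodup_keys_foldl_modify_key (pvPairs db sub)
      (fun p : Int × (Int × Int × Int × Int × Int) => p.1) []
      (fun (_ : PySem.Dict Int (List (Int × Int × Int × Int × Int)))
           (p : Int × (Int × Int × Int × Int × Int))
           (v : List (Int × Int × Int × Int × Int)) => v ++ [p.2])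
      PySem.Dict.empty (by decide)
  rw [PySem.Dict.items_eq_map_keys _ hnd []]
  have hkeys : ((pvPairs db sub).foldl (fun g2 p => g2.modify p.1 [] (· ++ [p.2]))
      PySem.Dict.empty).keys = PySem.List.dedup ((pvPairs db sub).map (·.1)) := by
    rw [PySem.Dict.keys_foldl_modify_key]
    simp [PySem.Dict.keys_empty, PySem.Set.update_nil_left]
  rw [hkeys]
  refine List.map_congr_left (fun k _ => ?_)
  rw [PySem.Dict.getD_foldl_modify_append]
  simp [pvPairs]
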